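-- pv_equiv track=rewrite | github.com/MarnitDekker/MathLogic | lab2/lab2.py | generate_and_format_consequences
-- ===== SOURCE A (Python) =====
-- import itertools
--
-- def generate_and_format_consequences(formatted_disjuncts):
--     consequences = set()
--     num_disjuncts = len(formatted_disjuncts)
--
--     consequences.update(formatted_disjuncts)
--
--     for r in range(2, num_disjuncts + 1):
--         for combination in itertools.combinations(formatted_disjuncts, r):
--             combined = " & ".join(f"({d})" for d in combination)
--             consequences.add(combined)
--
--     return sorted(list(consequences))
-- ===== SOURCE B (Python) =====
-- def generate_and_format_consequences(formatted_disjuncts):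
--     out = set()
--     for m in range(1, 2 ** len(formatted_disjuncts)):
--         sel = []
--         k = m
--         for d in formatted_disjuncts:
--             if k % 2 == 1:
--                 sel.append(d)
--             k //= 2
--         if len(sel) == 1:
--             out.add(sel[0])
--         else:
--             out.add(" & ".join("(" + d + ")" for d in sel))
--     return sorted(out)
-- ===== Notes on version B (the rewrite author's own statement) =====
-- stated objective: alternative
-- what changed: Replaces the size-indexed itertools.combinations double loop (plus a separate set.update for singletons) by a single flat bitmask enumeration m=1..2^n-1 that decodes each mask with one pass over the list, emitting the element raw for one-bit masks and the wrapped '&'-join otherwise.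
import Mathlib
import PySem

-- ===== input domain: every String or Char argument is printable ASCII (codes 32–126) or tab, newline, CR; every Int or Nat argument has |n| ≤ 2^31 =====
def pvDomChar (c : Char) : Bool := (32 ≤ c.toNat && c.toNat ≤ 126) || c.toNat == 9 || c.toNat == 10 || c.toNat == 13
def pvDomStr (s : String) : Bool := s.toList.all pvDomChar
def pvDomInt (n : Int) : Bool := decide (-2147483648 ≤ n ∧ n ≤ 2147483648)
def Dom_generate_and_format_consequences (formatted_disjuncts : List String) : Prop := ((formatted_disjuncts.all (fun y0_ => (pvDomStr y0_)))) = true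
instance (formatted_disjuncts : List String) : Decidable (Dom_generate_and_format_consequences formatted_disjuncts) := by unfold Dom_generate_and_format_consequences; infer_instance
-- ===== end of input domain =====

-- B replaces A's size-indexed combinations double loop by a single flat bitmask
-- enumeration of the power set (same result, same asymptotic cost; objective: alternative).


-- ===== PORT A =====
-- f"({d})" is ported as PySem.Str.join "" ["(", d, ")"] (exact string concatenation).
def generate_and_format_consequences (formatted_disjuncts : List String) : List String :=
  let consequences : PySem.Set String := PySem.Set.empty
  let num_disjuncts : Int := formatted_disjuncts.length
  let consequences := PySem.Set.update consequences formatted_disjuncts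
  let consequences :=
    (PySem.List.pyRange 2 (num_disjuncts + 1) 1).foldl
      (fun s r =>
        (PySem.List.combinations formatted_disjuncts r.toNat).foldl
          (fun s combination =>
            PySem.Set.add s
              (PySem.Str.join " & "
                (combination.map (fun d => PySem.Str.join "" ["(", d, ")"])))) s)
      consequences
  PySem.List.sorted consequences (fun x => x) false

-- ===== PORT B =====
-- "(" + d + ")" is ported as PySem.Str.join "" ["(", d, ")"] (exact string concatenation);
-- sel[0] under the guard len(sel) == 1 is ported as the total pyGetD (exact: index 0 is in range).
def generate_and_format_consequences_alt (formatted_disjuncts : List String) : List String :=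
  let out : PySem.Set String :=
    (PySem.List.pyRange 1 ((2 : Int) ^ formatted_disjuncts.length) 1).foldl
      (fun s m =>
        let sel :=
          (formatted_disjuncts.foldl
            (fun (st : List String × Int) d =>
              ((if PySem.Int.mod st.2 2 = 1 then st.1 ++ [d] else st.1),
               PySem.Int.floordiv st.2 2)) ([], m)).1
        if sel.length = 1 then PySem.Set.add s (PySem.List.pyGetD sel 0 "")
        else
          PySem.Set.add s
            (PySem.Str.join " & " (sel.map (fun d => PySem.Str.join "" ["(", d, ")"]))))
      PySem.Set.empty
  PySem.List.sorted out (fun x => x) false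

-- ===== PRECONDITION & SPEC =====
def Spec_generate_and_format_consequences (formatted_disjuncts : List String) (out : List String) : Prop := out = generate_and_format_consequences_alt formatted_disjuncts
instance (formatted_disjuncts : List String) (out : List String) : Decidable (Spec_generate_and_format_consequences formatted_disjuncts out) := by unfold Spec_generate_and_format_consequences; infer_instance

-- ===== CLAIM (what is proved, stated in full; the proofs are below) =====
def Claim_equal_generate_and_format_consequences : Prop := ∀ (formatted_disjuncts : List String), Dom_generate_and_format_consequences formatted_disjuncts → Spec_generate_and_format_consequences formatted_disjuncts (generate_and_format_consequences formatted_disjuncts)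

-- ===== LEMMAS AND PROOFS =====

-- the common formatting of a chosen subset of size ≥ 2
def pvJoinStr (c : List String) : String :=
  PySem.Str.join " & " (c.map (fun d => PySem.Str.join "" ["(", d, ")"]))

-- the subset of l selected by the bits of k (ascending index order)
def pvNatSel : List String → Nat → List String
  | [], _ => []
  | d :: ds, k => (if k % 2 = 1 then [d] else []) ++ pvNatSel ds (k / 2)

-- the string B's loop body adds for mask m (m ≥ 0)
def pvMaskStr (l : List String) (m : Int) : String :=
  let sel := pvNatSel l m.toNat
  if sel.length = 1 then PySem.List.pyGetD sel 0 "" else pvJoinStr sel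

-- the common characterisation of both result sets
def pvP (l : List String) (s : String) : Prop :=
  s ∈ l ∨ ∃ c, c.Sublist l ∧ 2 ≤ c.length ∧ s = pvJoinStr c

theorem pvSelB_eq (l : List String) (acc : List String) (k : Int) (hk : 0 ≤ k) :
    (l.foldl
        (fun (st : List String × Int) d =>
          ((if PySem.Int.mod st.2 2 = 1 then st.1 ++ [d] else st.1),
           PySem.Int.floordiv st.2 2)) (acc, k)).1 = acc ++ pvNatSel l k.toNat := by
  induction l generalizing acc k with
  | nil => simp [pvNatSel]
  | cons d ds ih =>
      have hmod : PySem.Int.mod k 2 = ((k.toNat % 2 : Nat) : Int) := by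
        simp only [PySem.Int.mod, Int.fmod_eq_emod]
        omega
      have hdiv : PySem.Int.floordiv k 2 = ((k.toNat / 2 : Nat) : Int) := by
        simp only [PySem.Int.floordiv, Int.fdiv_eq_ediv]
        omega
      have h2 : (0 : Int) ≤ ((k.toNat / 2 : Nat) : Int) := by positivity
      simp only [List.foldl_cons]
      rw [hmod, hdiv]
      split_ifs with h
      · rw [ih _ _ h2, Int.toNat_natCast]
        have hodd : k.toNat % 2 = 1 := by exact_mod_cast h
        simp [pvNatSel, hodd]
      · rw [ih _ _ h2, Int.toNat_natCast]
        have hodd : ¬ k.toNat % 2 = 1 := fun hc => h (by exact_mod_cast hc)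
        simp [pvNatSel, hodd]

theorem pvNatSel_sublist (l : List String) (k : Nat) : (pvNatSel l k).Sublist l := by
  induction l generalizing k with
  | nil => simp [pvNatSel]
  | cons d ds ih =>
      by_cases h : k % 2 = 1 <;>
        simp [pvNatSel, h, List.cons_sublist_cons, ih, List.Sublist.cons]

theorem pvNatSel_zero (l : List String) : pvNatSel l 0 = [] := by
  induction l with
  | nil => rfl
  | cons d ds ih => simp [pvNatSel, ih]

theorem pvNatSel_ne_nil (l : List String) (k : Nat) (h1 : 1 ≤ k) (h2 : k < 2 ^ l.length) :
    pvNatSel l k ≠ [] := by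
  induction l generalizing k with
  | nil => simp at h2; omega
  | cons d ds ih =>
      by_cases h : k % 2 = 1
      · simp [pvNatSel, h]
      · have hp : (2 : Nat) ^ (d :: ds).length = 2 * 2 ^ ds.length := by
          simp [List.length_cons, pow_succ]; ring
        have h1' : 1 ≤ k / 2 := by omega
        have h2' : k / 2 < 2 ^ ds.length := by omega
        simpa [pvNatSel, h] using ih (k / 2) h1' h2'

theorem pvExists_natSel (l : List String) (c : List String) (hc : c.Sublist l) :
    ∃ k, k < 2 ^ l.length ∧ pvNatSel l k = c := by
  induction l generalizing c with
  | nil =>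
      rw [List.sublist_nil] at hc
      exact ⟨0, by simp [pvNatSel, hc]⟩
  | cons d ds ih =>
      have hp : (2 : Nat) ^ (d :: ds).length = 2 * 2 ^ ds.length := by
        simp [List.length_cons, pow_succ]; ring
      rcases List.sublist_cons_iff.mp hc with h | ⟨c', rfl, h⟩
      · rcases ih c h with ⟨k, hk, hsel⟩
        refine ⟨2 * k, by omega, ?_⟩
        have : (2 * k) % 2 = 0 := by omega
        simp [pvNatSel, this, Nat.mul_div_cancel_left k (by norm_num : 0 < 2), hsel]
      · rcases ih c' h with ⟨k, hk, hsel⟩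
        refine ⟨2 * k + 1, by omega, ?_⟩
        have hm : (2 * k + 1) % 2 = 1 := by omega
        have hd : (2 * k + 1) / 2 = k := by omega
        simp [pvNatSel, hm, hd, hsel]

theorem pvMem_foldl_update (rs : List Int) (g : Int → List String) (s0 : PySem.Set String)
    (x : String) :
    (x ∈ rs.foldl (fun s r => PySem.Set.update s (g r)) s0) ↔ x ∈ s0 ∨ ∃ r ∈ rs, x ∈ g r := by
  induction rs generalizing s0 with
  | nil => simp
  | cons r rs ih =>
      simp only [List.foldl_cons, ih, PySem.Set.mem_update, List.mem_cons]
      constructor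
      · rintro ((h | h) | ⟨r', hr', h⟩)
        · exact Or.inl h
        · exact Or.inr ⟨r, Or.inl rfl, h⟩
        · exact Or.inr ⟨r', Or.inr hr', h⟩
      · rintro (h | ⟨r', (rfl | hr'), h⟩)
        · exact Or.inl (Or.inl h)
        · exact Or.inl (Or.inr h)
        · exact Or.inr ⟨r', hr', h⟩

theorem pvNodup_foldl_update (rs : List Int) (g : Int → List String) (s0 : PySem.Set String)
    (h : s0.Nodup) : (rs.foldl (fun s r => PySem.Set.update s (g r)) s0).Nodup := by
  induction rs generalizing s0 with
  | nil => exact h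
  | cons r rs ih => exact ih _ (PySem.Set.nodup_update _ _ h)

-- A's set, before sorting, characterised
theorem pvMemA (l : List String) (x : String) :
    (x ∈ (PySem.List.pyRange 2 ((l.length : Int) + 1) 1).foldl
        (fun s r =>
          (PySem.List.combinations l r.toNat).foldl
            (fun s combination => PySem.Set.add s (pvJoinStr combination)) s)
        (PySem.Set.update PySem.Set.empty l)) ↔ pvP l x := by
  have hbody : ∀ (s : PySem.Set String) (r : Int),
      (PySem.List.combinations l r.toNat).foldl
          (fun s combination => PySem.Set.add s (pvJoinStr combination)) s
        = PySem.Set.update s ((PySem.List.combinations l r.toNat).map pvJoinStr) := by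
    intro s r
    rw [PySem.Set.update_map_eq_foldl_add]
  simp only [hbody]
  rw [pvMem_foldl_update]
  simp only [PySem.Set.mem_update, PySem.Set.empty, List.not_mem_nil, false_or,
    PySem.List.mem_pyRange_one, List.mem_map, PySem.List.mem_combinations_iff, pvP]
  constructor
  · rintro (h | ⟨r, ⟨hr2, hrn⟩, c, ⟨hsub, hlen⟩, rfl⟩)
    · exact Or.inl h
    · exact Or.inr ⟨c, hsub, by omega, rfl⟩
  · rintro (h | ⟨c, hsub, hlen, rfl⟩)
    · exact Or.inl h
    · refine Or.inr ⟨(c.length : Int), ⟨by omega, ?_⟩, c, ⟨hsub, by omega⟩, rfl⟩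
      have := hsub.length_le
      omega

-- B's fold, rewritten as one ofList
theorem pvFoldB_eq (l : List String) :
    (PySem.List.pyRange 1 ((2 : Int) ^ l.length) 1).foldl
        (fun s m =>
          if (l.foldl
                (fun (st : List String × Int) d =>
                  ((if PySem.Int.mod st.2 2 = 1 then st.1 ++ [d] else st.1),
                   PySem.Int.floordiv st.2 2)) ([], m)).1.length = 1 then
            PySem.Set.add s
              (PySem.List.pyGetD
                (l.foldl
                  (fun (st : List String × Int) d =>
                    ((if PySem.Int.mod st.2 2 = 1 then st.1 ++ [d] else st.1),
                     PySem.Int.floordiv st.2 2)) ([], m)).1 0 "")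
          else
            PySem.Set.add s
              (PySem.Str.join " & "
                ((l.foldl
                    (fun (st : List String × Int) d =>
                      ((if PySem.Int.mod st.2 2 = 1 then st.1 ++ [d] else st.1),
                       PySem.Int.floordiv st.2 2)) ([], m)).1.map
                  (fun d => PySem.Str.join "" ["(", d, ")"]))))
        PySem.Set.empty
      = PySem.Set.ofList ((PySem.List.pyRange 1 ((2 : Int) ^ l.length) 1).map (pvMaskStr l)) := by
  have hcongr := PySem.List.foldl_congr_mem (PySem.List.pyRange 1 ((2 : Int) ^ l.length) 1)
    (fun (s : PySem.Set String) m =>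
          if (l.foldl
                (fun (st : List String × Int) d =>
                  ((if PySem.Int.mod st.2 2 = 1 then st.1 ++ [d] else st.1),
                   PySem.Int.floordiv st.2 2)) ([], m)).1.length = 1 then
            PySem.Set.add s
              (PySem.List.pyGetD
                (l.foldl
                  (fun (st : List String × Int) d =>
                    ((if PySem.Int.mod st.2 2 = 1 then st.1 ++ [d] else st.1),
                     PySem.Int.floordiv st.2 2)) ([], m)).1 0 "")
          else
            PySem.Set.add s
              (PySem.Str.join " & "
                ((l.foldl
                    (fun (st : List String × Int) d =>
                      ((if PySem.Int.mod st.2 2 = 1 then st.1 ++ [d] else st.1),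
                       PySem.Int.floordiv st.2 2)) ([], m)).1.map
                  (fun d => PySem.Str.join "" ["(", d, ")"]))))
    (fun s m => PySem.Set.add s (pvMaskStr l m)) PySem.Set.empty ?_
  · rw [hcongr, ← PySem.Set.update_map_eq_foldl_add,
      show (PySem.Set.empty : PySem.Set String) = [] from rfl, PySem.Set.update_nil_left]
  · intro s m hm
    have hm0 : (0 : Int) ≤ m := by
      have := (PySem.List.mem_pyRange_one.mp hm).1; omega
    have hsel := pvSelB_eq l [] m hm0
    simp only [List.nil_append] at hsel
    simp only [hsel, pvMaskStr, pvJoinStr]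
    split_ifs <;> rfl

-- B's set, before sorting, characterised
theorem pvMemB (l : List String) (x : String) :
    (x ∈ PySem.Set.ofList ((PySem.List.pyRange 1 ((2 : Int) ^ l.length) 1).map (pvMaskStr l)))
      ↔ pvP l x := by
  have h2n : ((2 : Int) ^ l.length) = ((2 ^ l.length : Nat) : Int) := by push_cast; ring
  rw [PySem.Set.mem_ofList]
  simp only [List.mem_map, PySem.List.mem_pyRange_one]
  constructor
  · rintro ⟨m, ⟨hm1, hm2⟩, rfl⟩
    have hk1 : 1 ≤ m.toNat := by omega
    have hk2 : m.toNat < 2 ^ l.length := by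
      rw [h2n] at hm2; omega
    have hsub := pvNatSel_sublist l m.toNat
    have hne := pvNatSel_ne_nil l m.toNat hk1 hk2
    by_cases hlen : (pvNatSel l m.toNat).length = 1
    · rcases List.length_eq_one_iff.mp hlen with ⟨d, hd⟩
      refine Or.inl ?_
      have : d ∈ l := (hd ▸ hsub).subset (by simp)
      simpa [pvMaskStr, hlen, hd, PySem.List.pyGetD_zero_cons] using this
    · have hge : 2 ≤ (pvNatSel l m.toNat).length := by
        have : (pvNatSel l m.toNat).length ≠ 0 := by
          simpa [List.length_eq_zero_iff] using hne
        omega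
      exact Or.inr ⟨pvNatSel l m.toNat, hsub, hge, by simp [pvMaskStr, hlen]⟩
  · rintro (hx | ⟨c, hsub, hlen, rfl⟩)
    · rcases pvExists_natSel l [x] (List.singleton_sublist.mpr hx) with ⟨k, hk, hsel⟩
      have hk1 : 1 ≤ k := by
        rcases Nat.eq_zero_or_pos k with rfl | h
        · rw [pvNatSel_zero] at hsel; simp at hsel
        · omega
      refine ⟨(k : Int), ⟨by omega, by rw [h2n]; exact_mod_cast hk⟩, ?_⟩
      simp [pvMaskStr, hsel, PySem.List.pyGetD_zero_cons]
    · rcases pvExists_natSel l c hsub with ⟨k, hk, hsel⟩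
      have hk1 : 1 ≤ k := by
        rcases Nat.eq_zero_or_pos k with rfl | h
        · rw [pvNatSel_zero] at hsel
          subst hsel; simp at hlen
        · omega
      refine ⟨(k : Int), ⟨by omega, by rw [h2n]; exact_mod_cast hk⟩, ?_⟩
      have : c.length ≠ 1 := by omega
      simp [pvMaskStr, hsel, this]

theorem pvNodupA (l : List String) :
    ((PySem.List.pyRange 2 ((l.length : Int) + 1) 1).foldl
        (fun s r =>
          (PySem.List.combinations l r.toNat).foldl
            (fun s combination => PySem.Set.add s (pvJoinStr combination)) s)
        (PySem.Set.update PySem.Set.empty l)).Nodup := by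
  have hbody : ∀ (s : PySem.Set String) (r : Int),
      (PySem.List.combinations l r.toNat).foldl
          (fun s combination => PySem.Set.add s (pvJoinStr combination)) s
        = PySem.Set.update s ((PySem.List.combinations l r.toNat).map pvJoinStr) := by
    intro s r
    rw [PySem.Set.update_map_eq_foldl_add]
  simp only [hbody]
  exact pvNodup_foldl_update _ _ _ (PySem.Set.nodup_update _ _ (by simp [PySem.Set.empty]))

-- ===== VERDICT (by name: the statement is the Claim_ definition above) =====
theorem generate_and_format_consequences_spec : Claim_equal_generate_and_format_consequences := by
  intro l _
  unfold Spec_generate_and_format_consequences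
  unfold generate_and_format_consequences generate_and_format_consequences_alt
  simp only []
  rw [pvFoldB_eq l, PySem.List.sorted_id_eq_sorted_id_iff_perm]
  refine (List.perm_ext_iff_of_nodup (pvNodupA l) (PySem.Set.nodup_ofList _)).mpr ?_
  intro a
  exact (pvMemA l a).trans ((pvMemB l a).symm)
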